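-- pv_equiv track=rewrite | github.com/danidox/docs-scripts | old scripts/mdxmaker3-op.py | remove_leading_h2
-- ===== SOURCE A (Python) =====
-- def remove_leading_h2(md_text: str) -> str:
--     """
--     Remove the very first '## ...' heading at the start of the Markdown content,
--     leaving all other headings untouched.
--     """
--     lines = md_text.splitlines()
--     new_lines = []
--     removed = False
--     for line in lines:
--         if not removed and line.strip().startswith("## "):
--             removed = True
--             continue
--         new_lines.append(line)
--     return "\n".join(new_lines).lstrip("\n")
-- ===== SOURCE B (Python) =====
-- def remove_leading_h2(md_text: str) -> str:
--     """
--     Remove the very first '## ...' heading at the start of the Markdown content,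
--     leaving all other headings untouched.
--     """
--     def without_first_h2(lines):
--         if not lines:
--             return []
--         head, rest = lines[0], lines[1:]
--         if head.strip().startswith("## "):
--             return rest
--         return [head] + without_first_h2(rest)
--
--     return "\n".join(without_first_h2(md_text.splitlines())).lstrip("\n")
-- ===== Notes on version B (the rewrite author's own statement) =====
-- stated objective: alternative
-- what changed: Replaces A's imperative scan carrying a boolean already-dropped flag and an accumulator list by a recursive decomposition on the line list: the recursion either drops the head when it is the first h2 heading (returning the tail unchanged) or keeps it and recurses, so no flag state exists at all.
import Mathlib
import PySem

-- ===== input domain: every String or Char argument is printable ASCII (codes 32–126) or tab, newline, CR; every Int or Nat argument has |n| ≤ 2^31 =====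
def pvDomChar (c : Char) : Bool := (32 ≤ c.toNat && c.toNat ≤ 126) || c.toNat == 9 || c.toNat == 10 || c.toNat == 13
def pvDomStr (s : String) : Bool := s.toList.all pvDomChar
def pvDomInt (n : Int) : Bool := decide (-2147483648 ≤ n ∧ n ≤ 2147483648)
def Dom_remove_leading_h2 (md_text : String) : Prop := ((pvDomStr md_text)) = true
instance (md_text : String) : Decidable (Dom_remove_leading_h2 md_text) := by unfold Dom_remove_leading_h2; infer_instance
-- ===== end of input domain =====

-- B replaces A's flag-carrying imperative scan by a recursive decomposition on the line list (no flag state); same result, alternative structure.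

-- ===== PORT A =====
-- helper: ln.strip().startswith("## ")
def pvIsH2 (ln : String) : Bool := PySem.Str.startswith (PySem.Str.strip ln) "## "

-- A's loop over lines with accumulator (new_lines, removed)
def pvStepA (st : List String × Bool) (line : String) : List String × Bool :=
  if !st.2 && pvIsH2 line then (st.1, true) else (st.1 ++ [line], st.2)

def remove_leading_h2 (md_text : String) : String :=
  let lines := PySem.Str.splitlines md_text
  let res := lines.foldl pvStepA ([], false)
  -- .lstrip("\n") ported by hand: drop leading '\n' characters (exact)
  String.ofList ((PySem.Str.join "\n" res.1).toList.dropWhile (· == '\n'))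

-- ===== PORT B =====
-- B's recursive helper without_first_h2
def pvWithoutFirstH2 : List String → List String
  | [] => []
  | head :: rest => if pvIsH2 head then rest else head :: pvWithoutFirstH2 rest

def remove_leading_h2_alt (md_text : String) : String :=
  -- .lstrip("\n") ported by hand: drop leading '\n' characters (exact)
  String.ofList ((PySem.Str.join "\n" (pvWithoutFirstH2 (PySem.Str.splitlines md_text))).toList.dropWhile (· == '\n'))

-- ===== PRECONDITION & SPEC =====
def Spec_remove_leading_h2 (md_text : String) (out : String) : Prop := out = remove_leading_h2_alt md_text
instance (md_text : String) (out : String) : Decidable (Spec_remove_leading_h2 md_text out) := by unfold Spec_remove_leading_h2; infer_instance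

-- ===== CLAIM (what is proved, stated in full; the proofs are below) =====
def Claim_equal_remove_leading_h2 : Prop := ∀ (md_text : String), Dom_remove_leading_h2 md_text → Spec_remove_leading_h2 md_text (remove_leading_h2 md_text)

-- ===== LEMMAS AND PROOFS =====

-- once 'removed' is true, A's loop just appends everything
theorem foldA_true (lines acc : List String) :
    (lines.foldl pvStepA (acc, true)).1 = acc ++ lines := by
  induction lines generalizing acc with
  | nil => simp
  | cons l ls ih => simp [pvStepA, ih]

-- A's flagged loop equals B's recursion
theorem foldA_eq (lines acc : List String) :
    (lines.foldl pvStepA (acc, false)).1 = acc ++ pvWithoutFirstH2 lines := by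
  induction lines generalizing acc with
  | nil => simp [pvWithoutFirstH2]
  | cons l ls ih =>
    by_cases h : pvIsH2 l
    · simp [pvStepA, pvWithoutFirstH2, h, foldA_true]
    · simp only [List.foldl_cons, pvStepA, h, Bool.not_false,
        Bool.and_false, if_neg (Bool.false_ne_true)]
      rw [ih]
      simp [pvWithoutFirstH2, h]

-- ===== VERDICT (by name: the statement is the Claim_ definition above) =====
theorem remove_leading_h2_spec : Claim_equal_remove_leading_h2 := by
  intro md _
  unfold Spec_remove_leading_h2 remove_leading_h2 remove_leading_h2_alt
  simp only []
  rw [foldA_eq]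
  simp
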